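-- pv_equiv track=rewrite | github.com/YaqianQi/Algorithm-and-Data-Structure | Python/Leetcode Daily Practice/Binary Search/1283.Find the Smallest Divisor Given a Threshold.py | smallestDivisor3
-- ===== SOURCE A (Python) =====
-- def smallestDivisor3(nums, threshold):
--     # leetcode solution
--     """
--     :type nums: List[int]
--     :type threshold: int
--     :rtype: int
--     """
--     def cando(n):
--         return sum(x//n  if x%n==0 else x//n+1 for x in nums )<=threshold
--
--     l,r=1,max(nums)
--     while l<r:
--         mid=(l+r)//2
--         if cando(mid):
--             r=mid
--         else:
--             l=mid+1
--     return l
-- ===== SOURCE B (Python) =====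
-- def smallestDivisor3(nums, threshold):
--     # Binary lifting: grow a power-of-two step past max(nums), then descend,
--     # keeping d = the largest candidate known NOT to satisfy the predicate.
--     def cando(n):
--         return sum(x//n if x%n==0 else x//n+1 for x in nums) <= threshold
--     mx = max(nums)
--     step = 1
--     while step <= mx:
--         step *= 2
--     d = 0
--     while step >= 1:
--         if d + step <= mx - 1 and not cando(d + step):
--             d += step
--         step //= 2
--     return d + 1
-- ===== Notes on version B (the rewrite author's own statement) =====
-- stated objective: alternative
-- what changed: Replaces the two-pointer midpoint bisection with a binary-lifting search: grow a power-of-two step past max(nums), then descend it, advancing a single lower pointer d past every probe the ceiling-sum predicate rejects, returning d+1; same cando predicate, no l/r interval or midpoint.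
-- outside the precondition, e.g. on smallestDivisor3([-3, 5], 1): A returns 3, B returns 5; on smallestDivisor3([5, -4, -9], -2): A returns 1, B returns 5
import Mathlib
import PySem

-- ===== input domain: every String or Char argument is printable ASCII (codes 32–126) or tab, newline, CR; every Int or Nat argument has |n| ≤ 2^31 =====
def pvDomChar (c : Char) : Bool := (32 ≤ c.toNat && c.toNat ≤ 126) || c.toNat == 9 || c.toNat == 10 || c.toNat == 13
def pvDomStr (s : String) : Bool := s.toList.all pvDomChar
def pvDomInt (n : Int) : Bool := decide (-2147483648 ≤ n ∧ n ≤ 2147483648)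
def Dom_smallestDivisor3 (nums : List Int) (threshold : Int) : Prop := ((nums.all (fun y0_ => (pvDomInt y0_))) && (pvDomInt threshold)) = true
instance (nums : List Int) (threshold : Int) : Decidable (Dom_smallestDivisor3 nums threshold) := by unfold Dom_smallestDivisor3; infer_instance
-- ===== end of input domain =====

-- B replaces A's two-pointer midpoint bisection by a binary-lifting (power-of-two step descent) search.

-- ===== PORT A =====
-- cando(n): sum(x//n if x%n==0 else x//n+1 for x in nums) <= threshold  (shared by both Pythons verbatim)
def pvCando (nums : List Int) (threshold : Int) (n : Int) : Bool :=
  decide ((nums.map (fun x =>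
    if PySem.Int.mod x n == 0 then PySem.Int.floordiv x n else PySem.Int.floordiv x n + 1)).sum ≤ threshold)

-- the while loop of A (binary search on [l, r])
def pvBsearch (nums : List Int) (threshold : Int) (l r : Int) : Int :=
  if h : l < r then
    let mid := PySem.Int.floordiv (l + r) 2
    if pvCando nums threshold mid then pvBsearch nums threshold l mid
    else pvBsearch nums threshold (mid + 1) r
  else l
termination_by (r - l).toNat
decreasing_by
  · have hb := PySem.Int.floordiv_two_mid_bounds (lo := l) (hi := r) (le_of_lt h)
    have hlt : PySem.Int.floordiv (l + r) 2 < r :=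
      (PySem.Int.floordiv_lt_iff_lt_mul (by omega)).mpr (by omega)
    omega
  · have hlt : PySem.Int.floordiv (l + r) 2 < r :=
      (PySem.Int.floordiv_lt_iff_lt_mul (by omega)).mpr (by omega)
    have hb := PySem.Int.floordiv_two_mid_bounds (lo := l) (hi := r) (le_of_lt h)
    omega

def smallestDivisor3 (nums : List Int) (threshold : Int) : Int :=
  match PySem.List.max? nums (fun x => x) with
  | some m => pvBsearch nums threshold 1 m
  | none => 0   -- Python's max([]) raises ValueError; excluded by Pre_

-- ===== PORT B =====
-- while step <= mx: step *= 2    ('1 ≤ step' is only a termination guard; the caller always passes step ≥ 1)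
def pvGrow (mx step : Int) : Int :=
  if h : 1 ≤ step ∧ step ≤ mx then pvGrow mx (step * 2) else step
termination_by (mx + 1 - step).toNat
decreasing_by omega

-- while step >= 1: if d + step <= mx - 1 and not cando(d + step): d += step; step //= 2
def pvDescend (nums : List Int) (threshold : Int) (mx d step : Int) : Int :=
  if h : 1 ≤ step then
    let d' := if d + step ≤ mx - 1 ∧ pvCando nums threshold (d + step) = false then d + step else d
    pvDescend nums threshold mx d' (PySem.Int.floordiv step 2)
  else d
termination_by step.toNat
decreasing_by
  have h1 : PySem.Int.floordiv step 2 < step :=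
    (PySem.Int.floordiv_lt_iff_lt_mul (by omega)).mpr (by omega)
  have h2 : (0:Int) ≤ PySem.Int.floordiv step 2 :=
    (PySem.Int.le_floordiv_iff_mul_le (by omega)).mpr (by omega)
  omega

def smallestDivisor3_alt (nums : List Int) (threshold : Int) : Int :=
  match PySem.List.max? nums (fun x => x) with
  | some mx => pvDescend nums threshold mx 0 (pvGrow mx 1) + 1
  | none => 0   -- max([]) raises; excluded by Pre_

-- ===== PRECONDITION & SPEC =====
-- Pre_ excludes the empty list, on which A's max(nums) raises ValueError, and mixed-sign lists
-- (a negative element together with a positive one, outside the problem's natural domain of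
-- positive nums): there the ceiling-sum predicate is not monotone in the divisor, so the value
-- A's binary-search midpoint trajectory happens to return is accidental.
def Pre_smallestDivisor3 (nums : List Int) (threshold : Int) : Prop :=
  nums ≠ [] ∧ ((∀ x ∈ nums, 0 ≤ x) ∨ (∀ x ∈ nums, x ≤ 0))
instance (nums : List Int) (threshold : Int) : Decidable (Pre_smallestDivisor3 nums threshold) := by
  unfold Pre_smallestDivisor3; infer_instance
def pvWitness_smallestDivisor3 : List Int × Int := ([1, 2, 5, 9], 6)

def Spec_smallestDivisor3 (nums : List Int) (threshold : Int) (out : Int) : Prop := out = smallestDivisor3_alt nums threshold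
instance (nums : List Int) (threshold : Int) (out : Int) : Decidable (Spec_smallestDivisor3 nums threshold out) := by unfold Spec_smallestDivisor3; infer_instance

-- ===== CLAIM (what is proved, stated in full; the proofs are below) =====
def Claim_equal_smallestDivisor3 : Prop := ∀ (nums : List Int) (threshold : Int), Dom_smallestDivisor3 nums threshold → Pre_smallestDivisor3 nums threshold → Spec_smallestDivisor3 nums threshold (smallestDivisor3 nums threshold)

-- ===== LEMMAS AND PROOFS =====

-- one ceiling term of cando
def pvCeil (x n : Int) : Int :=
  if PySem.Int.mod x n == 0 then PySem.Int.floordiv x n else PySem.Int.floordiv x n + 1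

theorem pvCeil_facts (x n : Int) (hn : 0 < n) :
    x ≤ n * pvCeil x n ∧ (∀ q : Int, x ≤ n * q → pvCeil x n ≤ q) ∧ (0 ≤ x → 0 ≤ pvCeil x n) := by
  have hdm := PySem.Int.floordiv_mul_add_mod x n
  have hs0 := PySem.Int.mod_nonneg x hn
  have hs1 := PySem.Int.mod_lt x hn
  unfold pvCeil
  by_cases hb : (PySem.Int.mod x n == 0) = true
  · have h0 : PySem.Int.mod x n = 0 := by simpa using hb
    rw [if_pos hb]
    refine ⟨by nlinarith, fun q hq => ?_, fun hx => ?_⟩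
    · exact le_of_mul_le_mul_left (by nlinarith : n * PySem.Int.floordiv x n ≤ n * q) hn
    · by_contra hc
      have h1 : PySem.Int.floordiv x n ≤ -1 := by omega
      nlinarith [mul_le_mul_of_nonneg_right h1 (le_of_lt hn)]
  · have h0 : PySem.Int.mod x n ≠ 0 := by simpa using hb
    rw [if_neg hb]
    have hs2 : 0 < PySem.Int.mod x n := by omega
    refine ⟨by nlinarith, fun q hq => ?_, fun hx => ?_⟩
    · have h1 : n * PySem.Int.floordiv x n < n * q := by nlinarith
      have := lt_of_mul_lt_mul_left h1 (le_of_lt hn)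
      omega
    · by_contra hc
      have h1 : PySem.Int.floordiv x n ≤ -2 := by omega
      nlinarith [mul_le_mul_of_nonneg_right h1 (le_of_lt hn)]

-- antitone in the divisor, for a nonnegative numerator
theorem pvCeil_antitone (x n n' : Int) (hx : 0 ≤ x) (hn : 0 < n) (hnn : n ≤ n') :
    pvCeil x n' ≤ pvCeil x n := by
  have hn' : 0 < n' := lt_of_lt_of_le hn hnn
  obtain ⟨h1, h2, h3⟩ := pvCeil_facts x n hn
  obtain ⟨_, h2', _⟩ := pvCeil_facts x n' hn'
  exact h2' _ (le_trans h1 (mul_le_mul_of_nonneg_right hnn (h3 hx)))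

theorem pvSum_antitone (nums : List Int) (n n' : Int) (hpos : ∀ x ∈ nums, 0 ≤ x)
    (hn : 0 < n) (hnn : n ≤ n') :
    (nums.map (fun x => pvCeil x n')).sum ≤ (nums.map (fun x => pvCeil x n)).sum := by
  induction nums with
  | nil => simp
  | cons a t ih =>
    simp only [List.map_cons, List.sum_cons]
    have := pvCeil_antitone a n n' (hpos a (by simp)) hn hnn
    have := ih (fun x hx => hpos x (by simp [hx]))
    omega

theorem pvCando_eq (nums : List Int) (threshold n : Int) :
    pvCando nums threshold n = decide ((nums.map (fun x => pvCeil x n)).sum ≤ threshold) := rfl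

theorem pvCando_mono (nums : List Int) (threshold n n' : Int) (hpos : ∀ x ∈ nums, 0 ≤ x)
    (hn : 0 < n) (hnn : n ≤ n') (h : pvCando nums threshold n = true) :
    pvCando nums threshold n' = true := by
  rw [pvCando_eq] at h ⊢
  simp only [decide_eq_true_eq] at h ⊢
  exact le_trans (pvSum_antitone nums n n' hpos hn hnn) h

-- the common target value t: first element of [a, b) satisfying p, else b
theorem pvScan_spec (p : Int → Bool) (a b : Int) (hab : a ≤ b) :
    let F := match (PySem.List.pyRange a b 1).find? p with | some d => d | none => b
    a ≤ F ∧ F ≤ b ∧ (∀ d, a ≤ d → d < F → p d = false) ∧ (F < b → p F = true) := by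
  intro F
  have hF : F = match (PySem.List.pyRange a b 1).find? p with | some d => d | none => b := rfl
  clear_value F
  induction h : (b - a).toNat generalizing a F with
  | zero =>
    have hba : b ≤ a := by omega
    rw [PySem.List.pyRange_one_eq_nil hba] at hF
    simp at hF
    subst hF
    exact ⟨hab, le_refl _, fun d h1 h2 => by omega, fun h1 => by omega⟩
  | succ k ih =>
    have halt : a < b := by omega
    rw [PySem.List.pyRange_one_cons halt] at hF
    simp only [List.find?_cons] at hF
    by_cases hpa : p a = true
    · rw [hpa] at hF
      simp at hF
      subst hF
      exact ⟨le_refl _, le_of_lt halt, fun d h1 h2 => by omega, fun _ => hpa⟩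
    · rw [Bool.not_eq_true] at hpa
      rw [hpa] at hF
      obtain ⟨i1, i2, i3, i4⟩ := ih (a + 1) (by omega) F hF (by omega)
      refine ⟨by omega, i2, fun d h1 h2 => ?_, i4⟩
      by_cases hda : d = a
      · subst hda; exact hpa
      · exact i3 d (by omega) h2

-- A's binary search converges to t whenever l ≤ t ≤ r
theorem pvBsearch_eq (nums : List Int) (threshold : Int) (t mx : Int)
    (hpos : ∀ x ∈ nums, 0 ≤ x) (ht1 : 1 ≤ t)
    (hlow : ∀ d, 1 ≤ d → d < t → pvCando nums threshold d = false)
    (hhigh : t < mx → pvCando nums threshold t = true) :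
    ∀ l r, 1 ≤ l → l ≤ t → t ≤ r → r ≤ mx → pvBsearch nums threshold l r = t := by
  intro l r
  induction hk : (r - l).toNat using Nat.strong_induction_on generalizing l r with
  | _ k ih =>
  intro hl1 hlt htr hrmx
  rw [pvBsearch]
  by_cases h : l < r
  · rw [dif_pos h]
    have hb := PySem.Int.floordiv_two_mid_bounds (lo := l) (hi := r) (le_of_lt h)
    have hltr : PySem.Int.floordiv (l + r) 2 < r :=
      (PySem.Int.floordiv_lt_iff_lt_mul (by omega)).mpr (by omega)
    set mid := PySem.Int.floordiv (l + r) 2 with hmid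
    by_cases hc : pvCando nums threshold mid = true
    · rw [if_pos hc]
      have htmid : t ≤ mid := by
        by_contra hcc
        rw [Int.not_le] at hcc
        rw [hlow mid (by omega) hcc] at hc
        exact Bool.false_ne_true hc
      exact ih (mid - l).toNat (by omega) l mid (by omega) hl1 hlt htmid (by omega)
    · rw [if_neg hc]
      have hmidt : mid + 1 ≤ t := by
        by_contra hcc
        rw [Int.not_le] at hcc
        have htm : t ≤ mid := by omega
        have : pvCando nums threshold mid = true :=
          pvCando_mono nums threshold t mid hpos (by omega) htm (hhigh (by omega))
        exact hc this
      exact ih (r - (mid + 1)).toNat (by omega) (mid + 1) r (by omega) (by omega) hmidt htr hrmx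
  · rw [dif_neg h]
    omega

theorem pvFdivTwoDouble (s : Int) : PySem.Int.floordiv (2 * s) 2 = s :=
  (PySem.Int.floordiv_eq_iff_of_pos (by norm_num)).mpr ⟨by omega, by omega⟩

theorem pvGrow_spec (mx : Int) (j : Nat) :
    ∃ k : Nat, pvGrow mx ((2:Int) ^ j) = (2:Int) ^ k ∧ mx < (2:Int) ^ k := by
  have hj : (0:Int) < 2 ^ j := pow_pos (by norm_num) j
  induction hn : (mx + 1 - (2:Int) ^ j).toNat using Nat.strong_induction_on generalizing j with
  | _ n ih =>
  rw [pvGrow]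
  by_cases h : 1 ≤ (2:Int) ^ j ∧ (2:Int) ^ j ≤ mx
  · rw [dif_pos h]
    have h2 : (2:Int) ^ j * 2 = (2:Int) ^ (j + 1) := by ring
    rw [h2]
    have hj1 : (0:Int) < 2 ^ (j + 1) := pow_pos (by norm_num) (j + 1)
    have h3 : (2:Int) ^ (j + 1) = 2 * 2 ^ j := by ring
    exact ih (mx + 1 - (2:Int) ^ (j + 1)).toNat (by omega) (j + 1) hj1 rfl
  · rw [dif_neg h]
    exact ⟨j, rfl, by omega⟩

-- when mx ≤ 0 the descent never advances and returns 0 (B then returns 1, as A does)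
theorem pvDescend_zero (nums : List Int) (threshold mx : Int) (hmx : mx ≤ 0) :
    ∀ s : Int, pvDescend nums threshold mx 0 s = 0 := by
  intro s
  induction hn : s.toNat using Nat.strong_induction_on generalizing s with
  | _ n ih =>
  rw [pvDescend]
  by_cases h : 1 ≤ s
  · rw [dif_pos h]
    have hcond : ¬ ((0:Int) + s ≤ mx - 1 ∧ pvCando nums threshold (0 + s) = false) := by
      rintro ⟨h1, _⟩; omega
    rw [if_neg hcond]
    have h1 : PySem.Int.floordiv s 2 < s :=
      (PySem.Int.floordiv_lt_iff_lt_mul (by omega)).mpr (by omega)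
    have h2 : (0:Int) ≤ PySem.Int.floordiv s 2 :=
      (PySem.Int.le_floordiv_iff_mul_le (by omega)).mpr (by omega)
    exact ih (PySem.Int.floordiv s 2).toNat (by omega) _ rfl
  · rw [dif_neg h]

-- B's descent converges to t - 1 from any state bracketing it
theorem pvDescend_eq (nums : List Int) (threshold mx t : Int)
    (hpos : ∀ x ∈ nums, 0 ≤ x) (ht1 : 1 ≤ t) (htmx : t ≤ mx)
    (hlow : ∀ e, 1 ≤ e → e < t → pvCando nums threshold e = false)
    (hhigh : t < mx → pvCando nums threshold t = true) :
    ∀ (k : Nat) (d : Int), 0 ≤ d → d ≤ t - 1 → t - 1 < d + 2 * (2:Int) ^ k →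
      pvDescend nums threshold mx d ((2:Int) ^ k) = t - 1 := by
  intro k
  induction k with
  | zero =>
    intro d h0 h1 h2
    rw [pow_zero] at h2 ⊢
    rw [pvDescend, dif_pos (by norm_num : (1:Int) ≤ 1)]
    have hfd : PySem.Int.floordiv 1 2 = 0 := by decide
    by_cases hc : d + 1 ≤ t - 1
    · rw [if_pos ⟨by omega, hlow (d + 1) (by omega) (by omega)⟩]
      rw [hfd, pvDescend, dif_neg (by norm_num)]
      omega
    · have hcond : ¬ (d + 1 ≤ mx - 1 ∧ pvCando nums threshold (d + 1) = false) := by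
        rintro ⟨hm, hp⟩
        have htlt : t < mx := by omega
        have : pvCando nums threshold (d + 1) = true :=
          pvCando_mono nums threshold t (d + 1) hpos (by omega) (by omega) (hhigh htlt)
        rw [this] at hp
        simp at hp
      rw [if_neg hcond, hfd, pvDescend, dif_neg (by norm_num)]
      omega
  | succ k ih =>
    intro d h0 h1 h2
    have hpk : (0:Int) < 2 ^ k := pow_pos (by norm_num) k
    have hsplit : (2:Int) ^ (k + 1) = 2 * 2 ^ k := by ring
    rw [pvDescend, dif_pos (by omega : (1:Int) ≤ 2 ^ (k + 1))]
    rw [hsplit, pvFdivTwoDouble]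
    by_cases hc : d + 2 * 2 ^ k ≤ t - 1
    · rw [if_pos ⟨by omega, hlow (d + 2 * 2 ^ k) (by omega) (by omega)⟩]
      exact ih (d + 2 * 2 ^ k) (by omega) hc (by omega)
    · have hcond : ¬ (d + 2 * 2 ^ k ≤ mx - 1 ∧ pvCando nums threshold (d + 2 * 2 ^ k) = false) := by
        rintro ⟨hm, hp⟩
        have htlt : t < mx := by omega
        have : pvCando nums threshold (d + 2 * 2 ^ k) = true :=
          pvCando_mono nums threshold t (d + 2 * 2 ^ k) hpos (by omega) (by omega) (hhigh htlt)
        rw [this] at hp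
        simp at hp
      rw [if_neg hcond]
      exact ih d h0 h1 (by omega)

-- ===== VERDICT (by name: the statement is the Claim_ definition above) =====
theorem smallestDivisor3_spec : Claim_equal_smallestDivisor3 := by
  intro nums threshold _ hpre
  obtain ⟨hne, hsign⟩ := hpre
  unfold Spec_smallestDivisor3 smallestDivisor3 smallestDivisor3_alt
  obtain ⟨mx, hm⟩ : ∃ mx, PySem.List.max? nums (fun x => x) = some mx := by
    cases hmx : PySem.List.max? nums (fun x => x) with
    | none => exact absurd ((PySem.List.max?_eq_none_iff nums (fun x => x)).mp hmx) hne
    | some m => exact ⟨m, rfl⟩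
  rw [hm]
  show pvBsearch nums threshold 1 mx = pvDescend nums threshold mx 0 (pvGrow mx 1) + 1
  by_cases hmx1 : 1 ≤ mx
  · have hpos : ∀ x ∈ nums, 0 ≤ x := by
      cases hsign with
      | inl h => exact h
      | inr h =>
        exfalso
        have hmem : mx ∈ nums := PySem.List.max?_mem hm
        have := h mx hmem
        omega
    obtain ⟨f1, f2, f3, f4⟩ :=
      pvScan_spec (fun d => pvCando nums threshold d) 1 mx hmx1
    obtain ⟨K, hK, hKmx⟩ := pvGrow_spec mx 0
    rw [pow_zero] at hK
    rw [hK]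
    have hK1 : (0:Int) < 2 ^ K := pow_pos (by norm_num) K
    rw [pvDescend_eq nums threshold mx _ hpos f1 f2 f3 f4 K 0 (le_refl 0) (by omega) (by omega)]
    rw [pvBsearch_eq nums threshold _ mx hpos f1 f3 f4 1 mx (le_refl 1) f1 f2 (le_refl mx)]
    omega
  · rw [pvBsearch, dif_neg (by omega : ¬ (1:Int) < mx)]
    rw [pvDescend_zero nums threshold mx (by omega) _]
    omega
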